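-- pv_equiv track=rewrite | github.com/jcolinpatrick/kryptos | scripts/e_stat_01_missing_tests.py | lz_complexity
-- ===== SOURCE A (Python) =====
-- def lz_complexity(s):
--     """Lempel-Ziv complexity (number of distinct substrings in LZ78 parse)."""
--     i, k, n = 0, 1, len(s)
--     c = 1
--     seen = set()
--     prefix = ''
--     for c_idx in range(n):
--         prefix = prefix + s[c_idx]
--         if prefix not in seen:
--             seen.add(prefix)
--             c += 1
--             prefix = ''
--     return c
-- ===== SOURCE B (Python) =====
-- def lz_complexity(s):
--     """Lempel-Ziv complexity via the classic LZ78 trie, encoded as a flat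
--     (node_id, char) -> node_id transition table: walks node ids instead of
--     rebuilding and hashing ever-growing prefix strings."""
--     trans = {}
--     cur = 0          # 0 = trie root
--     nxt = 1          # next fresh node id
--     c = 1
--     for ch in s:
--         nid = trans.get((cur, ch))
--         if nid is not None:
--             cur = nid
--         else:
--             trans[(cur, ch)] = nxt
--             nxt += 1
--             cur = 0
--             c += 1
--     return c
-- ===== Notes on version B (the rewrite author's own statement) =====
-- stated objective: alternative
-- what changed: Replaces the set of growing prefix strings by the classic LZ78 trie encoded as a flat (node_id, char) -> node_id transition dict, walking node ids instead of rebuilding and hashing prefix strings.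
import Mathlib
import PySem

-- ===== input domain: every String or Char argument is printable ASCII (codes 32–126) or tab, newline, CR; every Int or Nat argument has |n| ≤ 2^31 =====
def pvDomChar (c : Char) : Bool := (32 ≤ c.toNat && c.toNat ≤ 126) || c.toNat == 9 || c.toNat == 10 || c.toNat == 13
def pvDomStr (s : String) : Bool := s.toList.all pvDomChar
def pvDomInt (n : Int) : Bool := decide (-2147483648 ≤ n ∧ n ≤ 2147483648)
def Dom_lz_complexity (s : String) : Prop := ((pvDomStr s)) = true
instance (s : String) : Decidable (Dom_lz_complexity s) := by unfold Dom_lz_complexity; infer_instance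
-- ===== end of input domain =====

-- B replaces A's set of growing prefix strings by an LZ78 trie stored as a flat
-- (node_id, char) -> node_id transition dict (objective: alternative algorithm, same result).

-- ===== PORT A =====
-- loop body of A: prefix = prefix + s[c_idx]; if prefix not in seen: seen.add(prefix); c += 1; prefix = ''
def lzStepA (st : PySem.Set (List Char) × List Char × Int) (ch : Char) :
    PySem.Set (List Char) × List Char × Int :=
  match st with
  | (seen, pre, c) =>
    let pre := pre ++ [ch]
    if PySem.Set.contains seen pre then (seen, pre, c)
    else (PySem.Set.add seen pre, ([] : List Char), c + 1)

def lz_complexity (s : String) : Int :=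
  (s.toList.foldl lzStepA (PySem.Set.empty, ([] : List Char), (1 : Int))).2.2

-- ===== PORT B =====
-- loop body of B: nid = trans.get((cur, ch)); hit -> cur = nid; miss -> trans[(cur,ch)] = nxt; nxt += 1; cur = 0; c += 1
def lzStepB (st : PySem.Dict (Int × Char) Int × Int × Int × Int) (ch : Char) :
    PySem.Dict (Int × Char) Int × Int × Int × Int :=
  match st with
  | (d, cur, nxt, c) =>
    match d.get? (cur, ch) with
    | some nid => (d, nid, nxt, c)
    | none => (d.insert (cur, ch) nxt, 0, nxt + 1, c + 1)

def lz_complexity_alt (s : String) : Int :=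
  (s.toList.foldl lzStepB (PySem.Dict.empty, (0 : Int), (1 : Int), (1 : Int))).2.2.2

-- ===== PRECONDITION & SPEC =====
def Spec_lz_complexity (s : String) (out : Int) : Prop := out = lz_complexity_alt s
instance (s : String) (out : Int) : Decidable (Spec_lz_complexity s out) := by unfold Spec_lz_complexity; infer_instance

-- ===== CLAIM (what is proved, stated in full; the proofs are below) =====
def Claim_equal_lz_complexity : Prop := ∀ (s : String), Dom_lz_complexity s → Spec_lz_complexity s (lz_complexity s)

-- ===== LEMMAS AND PROOFS =====

-- node id of a phrase: 0 for the root (empty phrase), index in the seen list + 1 otherwise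
def lzId (seen : List (List Char)) (p : List Char) : Int :=
  if p = [] then 0 else ((seen.idxOf p : Nat) : Int) + 1

theorem lzId_nil (seen : List (List Char)) : lzId seen [] = 0 := by simp [lzId]

theorem lzId_inj (seen : List (List Char)) (a b : List Char)
    (ha : a = [] ∨ a ∈ seen) (hb : b = [] ∨ b ∈ seen)
    (h : lzId seen a = lzId seen b) : a = b := by
  by_cases hae : a = [] <;> by_cases hbe : b = []
  · rw [hae, hbe]
  · exfalso; simp [lzId, hae, hbe] at h; omega
  · exfalso; simp [lzId, hae, hbe] at h; omega
  · have ha' : a ∈ seen := ha.resolve_left hae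
    have hb' : b ∈ seen := hb.resolve_left hbe
    simp [lzId, hae, hbe] at h
    have h' : seen.idxOf a = seen.idxOf b := by omega
    calc a = seen[seen.idxOf a]'(List.idxOf_lt_length_of_mem ha') :=
            (List.getElem_idxOf (List.idxOf_lt_length_of_mem ha')).symm
      _ = seen[seen.idxOf b]'(List.idxOf_lt_length_of_mem hb') := by simp [h']
      _ = b := List.getElem_idxOf (List.idxOf_lt_length_of_mem hb')

theorem lzId_append_of_mem (seen : List (List Char)) (p' : List Char) (a : List Char)
    (ha : a = [] ∨ a ∈ seen) : lzId (seen ++ [p']) a = lzId seen a := by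
  by_cases hne : a = []
  · simp [lzId, hne]
  · have ha' : a ∈ seen := ha.resolve_left hne
    simp [lzId, hne, List.idxOf_append_of_mem ha']

theorem lzId_append_self (seen : List (List Char)) (p' : List Char)
    (hne : p' ≠ []) (hnm : p' ∉ seen) :
    lzId (seen ++ [p']) p' = (seen.length : Int) + 1 := by
  simp [lzId, hne, List.idxOf_append_of_notMem hnm]

-- a transition key hit forces the extended prefix to be a seen phrase
theorem lz_hit_forces (seen : List (List Char)) (pre : List Char) (ch : Char)
    (h2 : ∀ p ∈ seen, p ≠ [])
    (h3 : ∀ p ∈ seen, p.dropLast = [] ∨ p.dropLast ∈ seen)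
    (h4 : pre = [] ∨ pre ∈ seen)
    (q : List Char) (hq : q ∈ seen)
    (hk : lzId seen q.dropLast = lzId seen pre) (hc : q.getLastD 'a' = ch) :
    pre ++ [ch] ∈ seen := by
  rcases List.eq_nil_or_concat q with rfl | ⟨l, a, rfl⟩
  · exact absurd rfl (h2 [] hq)
  · simp only [List.concat_eq_append] at hq hk hc
    have h3l := h3 (l ++ [a]) hq
    simp only [List.dropLast_concat] at h3l hk
    simp only [List.getLastD_concat] at hc
    have hl : l = pre := lzId_inj seen l pre h3l h4 hk
    rw [← hl, ← hc]; exact hq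

-- the simulation invariant, carried through the fold
theorem lz_sim (cs : List Char) (seen : PySem.Set (List Char)) (pre : List Char) (c : Int)
    (d : PySem.Dict (Int × Char) Int)
    (h1 : seen.Nodup)
    (h2 : ∀ p ∈ seen, p ≠ [])
    (h3 : ∀ p ∈ seen, p.dropLast = [] ∨ p.dropLast ∈ seen)
    (h4 : pre = [] ∨ pre ∈ seen)
    (h6 : ∀ key j, d.get? key = some j ↔
          ∃ q ∈ seen, key = (lzId seen q.dropLast, q.getLastD 'a') ∧ j = lzId seen q) :
    (cs.foldl lzStepA (seen, pre, c)).2.2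
      = (cs.foldl lzStepB (d, lzId seen pre, ((seen.length : Int) + 1), c)).2.2.2 := by
  induction cs generalizing seen pre c d with
  | nil => rfl
  | cons ch cs ih =>
    simp only [List.foldl_cons]
    by_cases hmem : pre ++ [ch] ∈ seen
    · -- hit: the extended prefix is already a phrase
      have hA : lzStepA (seen, pre, c) ch = (seen, pre ++ [ch], c) := by
        simp [lzStepA, hmem]
      have hget : d.get? (lzId seen pre, ch) = some (lzId seen (pre ++ [ch])) := by
        refine (h6 _ _).mpr ⟨pre ++ [ch], hmem, ?_, rfl⟩
        simp
      have hB : lzStepB (d, lzId seen pre, ((seen.length : Int) + 1), c) ch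
          = (d, lzId seen (pre ++ [ch]), ((seen.length : Int) + 1), c) := by
        simp [lzStepB, hget]
      rw [hA, hB]
      exact ih seen (pre ++ [ch]) c d h1 h2 h3 (Or.inr hmem) h6
    · -- miss: a new phrase is created
      have hA : lzStepA (seen, pre, c) ch
          = (seen ++ [pre ++ [ch]], ([] : List Char), c + 1) := by
        simp [lzStepA, hmem]
      have hget : d.get? (lzId seen pre, ch) = none := by
        cases heq : d.get? (lzId seen pre, ch) with
        | none => rfl
        | some j =>
          exfalso
          obtain ⟨q, hq, hkey, _⟩ := (h6 _ _).mp heq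
          have hk : lzId seen q.dropLast = lzId seen pre := (Prod.mk.injEq _ _ _ _ ▸ hkey).1.symm
          have hc : q.getLastD 'a' = ch := ((Prod.mk.injEq _ _ _ _ ▸ hkey).2).symm
          exact hmem (lz_hit_forces seen pre ch h2 h3 h4 q hq hk hc)
      have hB : lzStepB (d, lzId seen pre, ((seen.length : Int) + 1), c) ch
          = (d.insert (lzId seen pre, ch) ((seen.length : Int) + 1), 0,
             ((seen.length : Int) + 1) + 1, c + 1) := by
        simp [lzStepB, hget]
      rw [hA, hB]
      have hpre' : (pre ++ [ch]) ≠ [] := by simp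
      -- invariant for the extended phrase list
      have h1' : (seen ++ [pre ++ [ch]]).Nodup := by
        refine h1.append (List.nodup_singleton _) ?_
        intro a ha hb
        simp only [List.mem_singleton] at hb
        exact hmem (hb ▸ ha)
      have h2' : ∀ p ∈ seen ++ [pre ++ [ch]], p ≠ [] := by
        intro p hp; rcases List.mem_append.mp hp with hp | hp
        · exact h2 p hp
        · simp at hp; rw [hp]; exact hpre'
      have h3' : ∀ p ∈ seen ++ [pre ++ [ch]],
          p.dropLast = [] ∨ p.dropLast ∈ seen ++ [pre ++ [ch]] := by
        intro p hp; rcases List.mem_append.mp hp with hp | hp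
        · rcases h3 p hp with h | h
          · exact Or.inl h
          · exact Or.inr (List.mem_append.mpr (Or.inl h))
        · simp at hp; rw [hp]; simp only [List.dropLast_concat]
          rcases h4 with h | h
          · exact Or.inl h
          · exact Or.inr (List.mem_append.mpr (Or.inl h))
      have h6' : ∀ key j,
          (d.insert (lzId seen pre, ch) ((seen.length : Int) + 1)).get? key = some j ↔
          ∃ q ∈ seen ++ [pre ++ [ch]],
            key = (lzId (seen ++ [pre ++ [ch]]) q.dropLast, q.getLastD 'a') ∧
            j = lzId (seen ++ [pre ++ [ch]]) q := by
        intro key j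
        rw [PySem.Dict.get?_insert]
        by_cases hkey : key = (lzId seen pre, ch)
        · simp only [hkey]
          constructor
          · rintro h
            have hj : j = (seen.length : Int) + 1 := by
              injection h with h; omega
            refine ⟨pre ++ [ch], List.mem_append.mpr (Or.inr (by simp)), ?_, ?_⟩
            · simp only [List.dropLast_concat, List.getLastD_concat]
              rw [lzId_append_of_mem seen (pre ++ [ch]) pre h4]
            · rw [hj, lzId_append_self seen (pre ++ [ch]) hpre' hmem]
          · rintro ⟨q, hq, hkeq, hjeq⟩
            rcases List.mem_append.mp hq with hq | hq
            · exfalso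
              have hdq : lzId (seen ++ [pre ++ [ch]]) q.dropLast = lzId seen q.dropLast :=
                lzId_append_of_mem seen (pre ++ [ch]) q.dropLast (h3 q hq)
              rw [hdq] at hkeq
              have hk : lzId seen q.dropLast = lzId seen pre :=
                ((Prod.mk.injEq _ _ _ _ ▸ hkeq).1).symm
              have hc : q.getLastD 'a' = ch := ((Prod.mk.injEq _ _ _ _ ▸ hkeq).2).symm
              exact hmem (lz_hit_forces seen pre ch h2 h3 h4 q hq hk hc)
            · simp at hq
              rw [hjeq, hq, lzId_append_self seen (pre ++ [ch]) hpre' hmem]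
              simp
        · simp only [if_neg hkey]
          rw [h6 key j]
          constructor
          · rintro ⟨q, hq, hkeq, hjeq⟩
            refine ⟨q, List.mem_append.mpr (Or.inl hq), ?_, ?_⟩
            · rw [hkeq, lzId_append_of_mem seen (pre ++ [ch]) q.dropLast (h3 q hq)]
            · rw [hjeq, lzId_append_of_mem seen (pre ++ [ch]) q (Or.inr hq)]
          · rintro ⟨q, hq, hkeq, hjeq⟩
            rcases List.mem_append.mp hq with hq | hq
            · refine ⟨q, hq, ?_, ?_⟩
              · rw [hkeq, lzId_append_of_mem seen (pre ++ [ch]) q.dropLast (h3 q hq)]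
              · rw [hjeq, lzId_append_of_mem seen (pre ++ [ch]) q (Or.inr hq)]
            · exfalso
              simp at hq
              apply hkey
              rw [hkeq, hq]
              simp only [List.dropLast_concat, List.getLastD_concat]
              rw [lzId_append_of_mem seen (pre ++ [ch]) pre h4]
      have := ih (seen ++ [pre ++ [ch]]) [] (c + 1)
        (d.insert (lzId seen pre, ch) ((seen.length : Int) + 1)) h1' h2' h3' (Or.inl rfl) h6'
      rw [lzId_nil] at this
      simpa [List.length_append] using this

-- ===== VERDICT (by name: the statement is the Claim_ definition above) =====
theorem lz_complexity_spec : Claim_equal_lz_complexity := by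
  intro s _
  unfold Spec_lz_complexity lz_complexity lz_complexity_alt
  have h := lz_sim s.toList PySem.Set.empty [] 1 PySem.Dict.empty
    (by simp [PySem.Set.empty]) (by simp [PySem.Set.empty]) (by simp [PySem.Set.empty])
    (Or.inl rfl) (by intro key j; simp [PySem.Dict.get?_empty, PySem.Set.empty])
  simpa [PySem.Set.empty, lzId] using h
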